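-- pv_equiv track=rewrite | github.com/gh0stintheshe11/LeetCode-Solutions | solutions/number-of-unique-flavors-after-sharing-k-candies/Python3.py | shareCandies
-- ===== SOURCE A (Python) =====
-- from typing import List
--
-- def shareCandies(candies: List[int], k: int) -> int:
--     rem = dict()
--     for c in candies[k:]:
--         if c in rem:
--             rem[c] += 1
--         else:
--             rem[c] = 1
--
--     m = len(rem)
--
--     for i in range(0, len(candies) - k):
--         if candies[i] in rem:
--             rem[candies[i]] += 1
--         else:
--             rem[candies[i]] = 1
--
--         rem[candies[i + k]] -= 1
--
--         if rem[candies[i + k]] == 0: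
--             del rem[candies[i + k]]
--
--         m = max(m, len(rem))
--
--     return m
-- ===== SOURCE B (Python) =====
-- from typing import List
--
-- def shareCandies(candies: List[int], k: int) -> int:
--     n = len(candies)
--     return max((len(set(candies[:j] + candies[j + k:])) for j in range(n - k + 1)),
--                default=0)
-- ===== Notes on version B (the rewrite author's own statement) =====
-- stated objective: simpler
-- what changed: Replaces A's incremental sliding-window dict of counts (insert/decrement/delete bookkeeping plus a running max) by a one-line maximum over all block positions of the distinct count of the remaining list, rebuilt from scratch per position.
import Mathlib
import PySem

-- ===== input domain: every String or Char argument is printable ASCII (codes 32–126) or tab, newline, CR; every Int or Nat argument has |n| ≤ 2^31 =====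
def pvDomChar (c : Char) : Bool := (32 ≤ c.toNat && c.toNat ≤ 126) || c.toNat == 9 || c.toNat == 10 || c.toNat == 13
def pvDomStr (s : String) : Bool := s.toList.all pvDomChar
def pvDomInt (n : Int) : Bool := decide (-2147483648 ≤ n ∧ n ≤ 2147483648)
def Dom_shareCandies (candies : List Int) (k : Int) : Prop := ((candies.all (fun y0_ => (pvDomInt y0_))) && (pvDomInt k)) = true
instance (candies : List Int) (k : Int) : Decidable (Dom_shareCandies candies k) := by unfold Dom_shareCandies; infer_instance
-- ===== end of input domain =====

-- B replaces A's incremental sliding-window dict of counts by a one-line maximum of the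
-- distinct count of the remaining list over all block positions (objective: simpler; not faster).

-- ===== PORT A =====
-- `rem[candies[i + k]] -= 1` is ported as insert of getD - 1, and candies[i] / candies[i+k]
-- as pyGetD with default 0: exact inside Pre_ (0 ≤ k), where those indices are in range and
-- the decremented key is always present, so the Python never raises.
def shareCandies (candies : List Int) (k : Int) : Int :=
  let rem : PySem.Dict Int Int :=
    (PySem.List.slice candies (some k) none).foldl
      (fun rem c =>
        if rem.contains c then rem.insert c (rem.getD c 0 + 1) else rem.insert c 1)
      PySem.Dict.empty
  let m : Int := (rem.size : Int)
  let st :=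
    (PySem.List.pyRange 0 ((candies.length : Int) - k) 1).foldl
      (fun (st : PySem.Dict Int Int × Int) i =>
        let rem := st.1
        let ci := PySem.List.pyGetD candies i 0
        let rem := if rem.contains ci then rem.insert ci (rem.getD ci 0 + 1)
                   else rem.insert ci 1
        let cik := PySem.List.pyGetD candies (i + k) 0
        let rem := rem.insert cik (rem.getD cik 0 - 1)
        let rem := if rem.getD cik 0 == 0 then rem.erase cik else rem
        (rem, max st.2 (rem.size : Int)))
      (rem, m)
  st.2

-- ===== PORT B =====
def shareCandies_alt (candies : List Int) (k : Int) : Int :=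
  let n : Int := (candies.length : Int)
  PySem.List.maxD
    ((PySem.List.pyRange 0 (n - k + 1) 1).map
      (fun j =>
        ((PySem.Set.ofList
            (PySem.List.slice candies none (some j) ++
             PySem.List.slice candies (some (j + k)) none)).length : Int)))
    (fun x => x) 0

-- ===== PRECONDITION & SPEC =====
-- Pre_ excludes k < 0 only: there A always raises IndexError (candies[i] is read for every
-- i in range(0, len(candies) - k), which runs past the end of the list).
def Pre_shareCandies (candies : List Int) (k : Int) : Prop := 0 ≤ k
instance (candies : List Int) (k : Int) : Decidable (Pre_shareCandies candies k) := by
  unfold Pre_shareCandies; infer_instance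
def pvWitness_shareCandies : List Int × Int := ([1, 2, 2, 3], 1)

def Spec_shareCandies (candies : List Int) (k : Int) (out : Int) : Prop := out = shareCandies_alt candies k
instance (candies : List Int) (k : Int) (out : Int) : Decidable (Spec_shareCandies candies k out) := by unfold Spec_shareCandies; infer_instance

-- ===== CLAIM (what is proved, stated in full; the proofs are below) =====
def Claim_equal_shareCandies : Prop := ∀ (candies : List Int) (k : Int), Dom_shareCandies candies k → Pre_shareCandies candies k → Spec_shareCandies candies k (shareCandies candies k)

-- ===== LEMMAS AND PROOFS =====

-- remaining candies after removing the length-K block starting at j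
def pvRem (cs : List Int) (K j : Nat) : List Int := cs.take j ++ cs.drop (j + K)

-- distinct count of the remaining candies (what B computes per position)
def pvF (cs : List Int) (K j : Nat) : Int := ((PySem.Set.ofList (pvRem cs K j)).length : Int)

-- loop invariant for A's dict: it is exactly the positive-count counter of pvRem cs K j
def pvInv (cs : List Int) (K j : Nat) (d : PySem.Dict Int Int) : Prop :=
  d.keys.Nodup ∧ ∀ c : Int, d.get? c =
    if (pvRem cs K j).count c = 0 then none else some (((pvRem cs K j).count c : Nat) : Int)

-- A's loop body, over a Nat loop index (the bridge from the Int pyRange is in the main proof)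
def pvStep (cs : List Int) (K : Nat) (st : PySem.Dict Int Int × Int) (t : Nat) :
    PySem.Dict Int Int × Int :=
  let rem := st.1
  let a := cs.getD t 0
  let rem := if rem.contains a then rem.insert a (rem.getD a 0 + 1) else rem.insert a 1
  let b := cs.getD (t + K) 0
  let rem := rem.insert b (rem.getD b 0 - 1)
  let rem := if rem.getD b 0 == 0 then rem.erase b else rem
  (rem, max st.2 (rem.size : Int))

theorem dict_get?_eq_ite (d : PySem.Dict Int Int) (c : Int) :
    d.get? c = if d.contains c = true then some (d.getD c 0) else none := by
  rw [PySem.Dict.contains_eq_isSome_get?, PySem.Dict.getD_eq_get?_getD]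
  cases h : d.get? c <;> simp

theorem dict_get?_erase (d : PySem.Dict Int Int) (x c : Int) :
    (d.erase x).get? c = if c = x then none else d.get? c := by
  rcases d with ⟨items⟩
  induction items with
  | nil => simp [PySem.Dict.erase, PySem.Dict.get?]
  | cons p t ih =>
      by_cases hpx : p.1 = x <;> by_cases hpc : p.1 = c <;>
        simp_all [PySem.Dict.erase, PySem.Dict.get?]

theorem dict_nodup_keys_erase (d : PySem.Dict Int Int) (x : Int)
    (h : d.keys.Nodup) : (d.erase x).keys.Nodup := by
  refine h.sublist ?_
  simpa [PySem.Dict.keys, PySem.Dict.erase] using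
    ((List.filter_sublist (l := d.items) (p := fun p => !(p.1 == x))).map Prod.fst)

theorem dict_size_of_inv (cs : List Int) (K j : Nat) (d : PySem.Dict Int Int)
    (h : pvInv cs K j d) : (d.size : Int) = pvF cs K j := by
  obtain ⟨hnd, hget⟩ := h
  have hmem : ∀ c : Int, c ∈ d.keys ↔ c ∈ pvRem cs K j := by
    intro c
    rw [← PySem.Dict.contains_iff_mem_keys, PySem.Dict.contains_eq_isSome_get?, hget c]
    rcases Nat.eq_zero_or_pos ((pvRem cs K j).count c) with h0 | h0
    · simp [h0, List.count_eq_zero.mp h0]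
    · simp [Nat.pos_iff_ne_zero.mp h0, List.count_pos_iff.mp h0]
  have h1 : d.keys.length = (PySem.Set.ofList (pvRem cs K j)).length := by
    rw [← List.toFinset_card_of_nodup hnd,
        ← List.toFinset_card_of_nodup (PySem.Set.nodup_ofList (pvRem cs K j))]
    congr 1
    ext c
    simp [hmem c, PySem.Set.mem_ofList]
  have hsz : d.size = d.keys.length := by simp [PySem.Dict.size, PySem.Dict.keys]
  simp [pvF, hsz, h1]

theorem inv_init (cs : List Int) (K : Nat) :
    pvInv cs K 0 (PySem.Dict.counter (cs.drop K)) := by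
  refine ⟨PySem.Dict.nodup_keys_counter _, fun c => ?_⟩
  rw [dict_get?_eq_ite, PySem.Dict.contains_counter, PySem.Dict.getD_counter]
  have hrem : pvRem cs K 0 = cs.drop K := by simp [pvRem]
  rw [hrem]
  by_cases hc : c ∈ cs.drop K
  · simp [hc, List.count_eq_zero]
  · simp [hc, List.count_eq_zero]

theorem initial_fold (cs : List Int) (K : Nat) :
    (cs.drop K).foldl
      (fun rem c =>
        if rem.contains c then rem.insert c (rem.getD c 0 + 1) else rem.insert c 1)
      PySem.Dict.empty = PySem.Dict.counter (cs.drop K) := by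
  rw [PySem.List.foldl_congr_mem _ _ (fun d x => d.insert x (d.getD x 0 + 1)) _ ?_,
      PySem.Dict.foldl_insert_getD_add_one_eq_counter]
  intro acc x _
  by_cases hc : acc.contains x
  · simp [hc]
  · simp [hc, PySem.Dict.getD_of_not_contains _ _ (by simpa using hc)]

theorem count_step (cs : List Int) (K j : Nat) (h : j + K < cs.length) (c : Int) :
    (pvRem cs K (j + 1)).count c + (if c = cs.getD (j + K) 0 then 1 else 0)
      = (pvRem cs K j).count c + (if c = cs.getD j 0 then 1 else 0) := by
  have hj : j < cs.length := by omega
  have htake : cs.take (j + 1) = cs.take j ++ [cs[j]] := by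
    rw [List.take_add_one]
    simp [List.getElem?_eq_getElem hj]
  have hdrop : cs.drop (j + K) = cs[j + K] :: cs.drop (j + K + 1) := List.drop_eq_getElem_cons h
  have h1 : j + 1 + K = j + K + 1 := by omega
  rw [List.getD_eq_getElem cs 0 h, List.getD_eq_getElem cs 0 hj]
  simp only [pvRem, h1, htake, hdrop, List.count_append, List.count_cons]
  by_cases hca : c = cs[j] <;> by_cases hcb : c = cs[j + K] <;>
    simp [hca, hcb, beq_iff_eq] <;> split_ifs <;> omega

theorem mem_pvRem_b (cs : List Int) (K j : Nat) (h : j + K < cs.length) :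
    cs.getD (j + K) 0 ∈ pvRem cs K j := by
  rw [List.getD_eq_getElem cs 0 h]
  unfold pvRem
  refine List.mem_append.mpr (Or.inr ?_)
  rw [List.drop_eq_getElem_cons h]
  exact List.mem_cons_self

-- the dict transition of one loop iteration, list-abstract
theorem inv_step (d : PySem.Dict Int Int) (L L' : List Int) (a b : Int)
    (hb : b ∈ L)
    (hcnt : ∀ c : Int, L'.count c + (if c = b then 1 else 0)
              = L.count c + (if c = a then 1 else 0))
    (hnd : d.keys.Nodup)
    (hd : ∀ c : Int, d.get? c = if L.count c = 0 then none else some ((L.count c : Nat) : Int)) :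
    (let d1 := if d.contains a then d.insert a (d.getD a 0 + 1) else d.insert a 1
     let d2 := d1.insert b (d1.getD b 0 - 1)
     let d3 := if d2.getD b 0 == 0 then d2.erase b else d2
     d3.keys.Nodup ∧ ∀ c : Int, d3.get? c =
       if L'.count c = 0 then none else some ((L'.count c : Nat) : Int)) := by
  intro d1 d2 d3
  have hd1def : d1 = if d.contains a then d.insert a (d.getD a 0 + 1) else d.insert a 1 := rfl
  have hd2def : d2 = d1.insert b (d1.getD b 0 - 1) := rfl
  have hd3def : d3 = if d2.getD b 0 == 0 then d2.erase b else d2 := rfl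
  have hd1 : ∀ c : Int, d1.get? c =
      if L.count c + (if c = a then 1 else 0) = 0 then none
      else some (((L.count c + (if c = a then 1 else 0) : Nat)) : Int) := by
    intro c
    by_cases hca : d.contains a = true
    · have hL : L.count a ≠ 0 := by
        have hda := hd a
        rw [PySem.Dict.contains_eq_isSome_get?] at hca
        by_contra h0
        simp only [h0] at hda
        simp [hda] at hca
      have hgd : d.getD a 0 = (L.count a : Int) := by
        rw [PySem.Dict.getD_eq_get?_getD, hd a]
        simp [hL]
      rw [hd1def, if_pos hca, PySem.Dict.get?_insert, hgd]
      by_cases hc : c = a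
      · subst hc; simp
      · simp [hc, hd c]
    · have hL : L.count a = 0 := by
        have hda := hd a
        rw [PySem.Dict.contains_eq_isSome_get?] at hca
        by_contra h0
        simp only [if_neg h0] at hda
        simp [hda] at hca
      rw [hd1def, if_neg hca, PySem.Dict.get?_insert]
      by_cases hc : c = a
      · subst hc; simp [hL]
      · simp [hc, hd c]
  have hnd1 : d1.keys.Nodup := by
    rw [hd1def]; split_ifs <;> exact PySem.Dict.nodup_keys_insert _ _ _ hnd
  have hnd2 : d2.keys.Nodup := hd2def ▸ PySem.Dict.nodup_keys_insert _ _ _ hnd1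
  have hn1b : L.count b + (if b = a then 1 else 0) ≠ 0 := by
    have : L.count b ≠ 0 := (List.count_pos_iff.mpr hb).ne'
    by_cases hba : b = a <;> simp [hba] ; omega
  have hgd1b : d1.getD b 0 = ((L.count b + (if b = a then 1 else 0) : Nat) : Int) := by
    rw [PySem.Dict.getD_eq_get?_getD, hd1 b, if_neg hn1b, Option.getD_some]
  have hd2g : ∀ c : Int, d2.get? c =
      if c = b then some (((L.count b + (if b = a then 1 else 0) : Nat) : Int) - 1)
      else d1.get? c := by
    intro c
    rw [hd2def, PySem.Dict.get?_insert, hgd1b]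
  have hval : ((L.count b + (if b = a then 1 else 0) : Nat) : Int) - 1 = (L'.count b : Int) := by
    have h1 := hcnt b
    rw [if_pos rfl] at h1
    by_cases hba : b = a
    · rw [if_pos hba] at h1 ⊢
      push_cast
      omega
    · rw [if_neg hba] at h1 ⊢
      push_cast
      omega
  have hgd2b : d2.getD b 0 = (L'.count b : Int) := by
    rw [PySem.Dict.getD_eq_get?_getD, hd2g b, if_pos rfl, hval]
    rfl
  refine ⟨?_, ?_⟩
  · rw [hd3def]
    split_ifs
    · exact dict_nodup_keys_erase _ _ hnd2
    · exact hnd2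
  · intro c
    by_cases hzb : L'.count b = 0
    · have hcond : (d2.getD b 0 == 0) = true := by rw [hgd2b]; simp [hzb]
      rw [hd3def, hcond]
      simp only [ite_true]
      by_cases hcb : c = b
      · subst hcb
        rw [dict_get?_erase, if_pos rfl, if_pos hzb]
      · rw [dict_get?_erase, if_neg hcb, hd2g c, if_neg hcb, hd1 c]
        have heq : L.count c + (if c = a then 1 else 0) = L'.count c := by
          have := hcnt c
          simp only [if_neg hcb] at this
          omega
        rw [heq]
    · have hcond : (d2.getD b 0 == 0) = false := by
        rw [hgd2b]
        simp
        exact_mod_cast hzb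
      rw [hd3def, hcond]
      simp only [Bool.false_eq_true, if_false]
      by_cases hcb : c = b
      · subst hcb
        rw [hd2g _, if_pos rfl, hval, if_neg hzb]
      · rw [hd2g c, if_neg hcb, hd1 c]
        have heq : L.count c + (if c = a then 1 else 0) = L'.count c := by
          have := hcnt c
          simp only [if_neg hcb] at this
          omega
        rw [heq]

theorem loop_inv (cs : List Int) (K : Nat) (j : Nat) (hj : j + K ≤ cs.length)
    (d0 : PySem.Dict Int Int) (h0 : pvInv cs K 0 d0) :
    pvInv cs K j ((List.range j).foldl (pvStep cs K) (d0, (d0.size : Int))).1 ∧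
    ((List.range j).foldl (pvStep cs K) (d0, (d0.size : Int))).2
      = ((List.range j).map (fun t => pvF cs K (t + 1))).foldl max (pvF cs K 0) := by
  induction j with
  | zero =>
      refine ⟨h0, ?_⟩
      simpa using dict_size_of_inv cs K 0 d0 h0
  | succ j ih =>
      have hj' : j + K ≤ cs.length := by omega
      obtain ⟨ih1, ih2⟩ := ih hj'
      have hlt : j + K < cs.length := by omega
      have hmain := inv_step
        ((List.range j).foldl (pvStep cs K) (d0, (d0.size : Int))).1
        (pvRem cs K j) (pvRem cs K (j + 1)) (cs.getD j 0) (cs.getD (j + K) 0)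
        (mem_pvRem_b cs K j hlt) (count_step cs K j hlt) ih1.1 ih1.2
      rw [List.range_succ, List.foldl_append, List.map_append, List.foldl_append]
      refine ⟨hmain, ?_⟩
      have hsz := dict_size_of_inv cs K (j + 1) _ hmain
      simp only [List.foldl_cons, List.foldl_nil, List.map_cons, List.map_nil]
      rw [← ih2]
      show max _ _ = _
      rw [hsz]

theorem bridge_A (cs : List Int) (K : Nat) :
    shareCandies cs (K : Int)
      = ((List.range (cs.length - K)).foldl (pvStep cs K)
          (PySem.Dict.counter (cs.drop K),
           ((PySem.Dict.counter (cs.drop K)).size : Int))).2 := by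
  unfold shareCandies
  have h1 : ((cs.length : Int) - (K : Int) - 0).toNat = cs.length - K := by
    rw [sub_zero]; exact Int.toNat_sub _ _
  simp only [PySem.List.slice_from_natCast, initial_fold, PySem.List.pyRange_one, h1,
    List.foldl_map]
  congr 1
  apply PySem.List.foldl_congr_mem
  intro st t _
  show _ = pvStep cs K st t
  unfold pvStep
  simp only [zero_add, ← Nat.cast_add, PySem.List.pyGetD_natCast]

theorem bridge_B (cs : List Int) (K : Nat) (hK : K ≤ cs.length) :
    shareCandies_alt cs (K : Int)
      = PySem.List.maxD ((List.range (cs.length - K + 1)).map (pvF cs K)) (fun x => x) 0 := by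
  unfold shareCandies_alt
  have h1 : ((cs.length : Int) - (K : Int) + 1 - 0).toNat = cs.length - K + 1 := by
    omega
  simp only [PySem.List.pyRange_one, h1, List.map_map]
  congr 1
  apply List.map_congr_left
  intro t _
  show _ = pvF cs K t
  simp only [Function.comp_apply, zero_add, ← Nat.cast_add, PySem.List.slice_to_natCast,
    PySem.List.slice_from_natCast]
  rfl

theorem shareCandies_spec : Claim_equal_shareCandies := by
  intro candies k _ hk
  unfold Spec_shareCandies
  have hk' : k = ((k.toNat : Nat) : Int) := (Int.toNat_of_nonneg hk).symm
  rw [hk']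
  set K := k.toNat with hK
  by_cases hKn : K ≤ candies.length
  · -- the loop actually runs over n - K block positions
    rw [bridge_A, bridge_B candies K hKn]
    have hinit := inv_init candies K
    have hli := loop_inv candies K (candies.length - K) (by omega) _ hinit
    rw [hli.2]
    have hrange : List.range (candies.length - K + 1)
        = 0 :: (List.range (candies.length - K)).map Nat.succ := List.range_succ_eq_map
    rw [hrange, List.map_cons, List.map_map]
    unfold PySem.List.maxD
    rw [PySem.List.max?_id_cons]
    simp only [Option.getD_some]
    congr 1
  · -- k exceeds the list length: the loop is empty and both sides are 0
    have hn : candies.length < K := by omega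
    rw [bridge_A]
    have hd : candies.drop K = [] := List.drop_eq_nil_of_le (by omega)
    have he : candies.length - K = 0 := by omega
    rw [hd, he]
    have hA : ((List.range 0).foldl (pvStep candies K)
        (PySem.Dict.counter ([] : List Int),
         ((PySem.Dict.counter ([] : List Int)).size : Int))).2 = 0 := rfl
    rw [hA]
    unfold shareCandies_alt
    have h1 : ((candies.length : Int) - (K : Int) + 1 - 0).toNat = 0 := by omega
    simp only [PySem.List.pyRange_one, h1, List.range_zero, List.map_nil]
    rfl
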